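-- pv_equiv track=rewrite | github.com/rh569/advent-of-code-2015 | 01/main.py | part_two
-- ===== SOURCE A (Python) =====
-- def part_two(input: str) -> int:
--     floor = 0
--
--     for i in range(0, len(input)):
--         if (input[i] == '('):
--             floor += 1
--         if (input[i] == ')'):
--             floor -= 1
--
--         if floor == -1:
--             return i + 1
--
--     raise RuntimeError('did not reach basement (floor -1)')
-- ===== SOURCE B (Python) =====
-- def part_two(input: str) -> int:
--     deltas = [(c == '(') - (c == ')') for c in input]
--     sums = []
--     total = 0
--     for d in deltas:
--         total += d
--         sums.append(total)
--     if -1 in sums: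
--         return sums.index(-1) + 1
--     raise RuntimeError('did not reach basement (floor -1)')
-- ===== Notes on version B (the rewrite author's own statement) =====
-- stated objective: alternative
-- what changed: B separates the work into two phases - map characters to +1/-1/0 deltas, build the full prefix-sum list, then locate -1 with list membership and .index - instead of A's single fused loop that increments a counter and tests it at every character.
import Mathlib
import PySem

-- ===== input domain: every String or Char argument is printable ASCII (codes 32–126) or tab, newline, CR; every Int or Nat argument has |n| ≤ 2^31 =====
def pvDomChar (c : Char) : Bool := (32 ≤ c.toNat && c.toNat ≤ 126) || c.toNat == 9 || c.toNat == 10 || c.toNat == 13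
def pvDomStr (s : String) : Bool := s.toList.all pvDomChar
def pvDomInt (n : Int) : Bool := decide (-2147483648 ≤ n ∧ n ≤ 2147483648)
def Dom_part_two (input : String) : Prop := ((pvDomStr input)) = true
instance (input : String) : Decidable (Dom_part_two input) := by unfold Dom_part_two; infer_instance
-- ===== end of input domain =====

-- B separates the work into phases: map to deltas, build the prefix-sum list, then search for -1; A fuses counting and testing in one loop.

-- ===== PORT A =====
-- A's for-loop over indices, transliterated as structural recursion over the characters
-- carrying the index i and the running floor; the final `raise` is excluded by Pre_ (0 is a junk value there).
def partTwoLoopA : List Char → Int → Int → Int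
  | [], _, _ => 0
  | c :: cs, i, floor =>
    let floor := if c = '(' then floor + 1 else floor
    let floor := if c = ')' then floor - 1 else floor
    if floor = -1 then i + 1 else partTwoLoopA cs (i + 1) floor

def part_two (input : String) : Int := partTwoLoopA input.toList 0 0

-- ===== PORT B =====
def pvDelta (c : Char) : Int := (if c = '(' then 1 else 0) - (if c = ')' then 1 else 0)

-- the prefix-sum building loop of Source B
def pvPrefixSums : Int → List Int → List Int
  | _, [] => []
  | total, d :: ds => (total + d) :: pvPrefixSums (total + d) ds

def part_two_alt (input : String) : Int :=
  let sums := pvPrefixSums 0 (input.toList.map pvDelta)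
  match PySem.List.index? sums (-1) with
  | some k => (k : Int) + 1
  | none => 0  -- Source B raises RuntimeError here; excluded by Pre_

-- ===== PRECONDITION & SPEC =====
-- Pre_ excludes exactly the inputs on which A (and B) raise RuntimeError: no prefix of the input reaches floor -1.
def Pre_part_two (input : String) : Prop :=
  ∃ n ∈ List.range (input.toList.length + 1),
    ((input.toList.take n).map pvDelta).sum = -1
instance (input : String) : Decidable (Pre_part_two input) := by unfold Pre_part_two; infer_instance

def pvWitness_part_two : String := "(())())"

def Spec_part_two (input : String) (out : Int) : Prop := out = part_two_alt input
instance (input : String) (out : Int) : Decidable (Spec_part_two input out) := by unfold Spec_part_two; infer_instance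

-- ===== CLAIM (what is proved, stated in full; the proofs are below) =====
def Claim_equal_part_two : Prop := ∀ (input : String), Dom_part_two input → Pre_part_two input → Spec_part_two input (part_two input)

-- ===== LEMMAS AND PROOFS =====

-- A's two sequential ifs compute exactly one delta step.
theorem stepA_eq_delta (c : Char) (f : Int) :
    (if c = ')' then (if c = '(' then f + 1 else f) - 1 else (if c = '(' then f + 1 else f))
      = f + pvDelta c := by
  unfold pvDelta; split_ifs <;> omega

theorem loopA_eq_search (cs : List Char) (i f : Int) :
    partTwoLoopA cs i f =
      match PySem.List.index? (pvPrefixSums f (cs.map pvDelta)) (-1) with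
      | some k => i + (k : Int) + 1
      | none => 0 := by
  induction cs generalizing i f with
  | nil => simp [partTwoLoopA, pvPrefixSums, PySem.List.index?]
  | cons c cs ih =>
    rw [partTwoLoopA, stepA_eq_delta]
    by_cases h : f + pvDelta c = -1
    · rw [List.map_cons, pvPrefixSums, h, PySem.List.index?_cons_self]
      simp
    · rw [List.map_cons, pvPrefixSums,
        PySem.List.index?_cons_of_ne _ h]
      simp only [h, if_false]
      rw [ih (i + 1) (f + pvDelta c)]
      cases hk : PySem.List.index? (pvPrefixSums (f + pvDelta c) (cs.map pvDelta)) (-1) with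
      | none => simp
      | some k => simp only [Option.map_some]; push_cast; ring

-- ===== VERDICT (by name: the statement is the Claim_ definition above) =====
theorem part_two_spec : Claim_equal_part_two := by
  intro input _ _
  unfold Spec_part_two part_two part_two_alt
  rw [loopA_eq_search]
  cases hk : PySem.List.index? (pvPrefixSums 0 (input.toList.map pvDelta)) (-1) with
  | none => simp only [hk]
  | some k => simp only [hk]; ring
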